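-- pv_equiv track=rewrite | github.com/soodaayush/canadian-computing-competition | 2022/harpTuning.py | harpTuning
-- ===== SOURCE A (Python) =====
-- def harpTuning(instructions):
--     instruction = ""
--     cleanInstructions = []
--
--     for i in instructions:
--         if i == "+":
--             instruction += " tighten "
--
--         if i == "-":
--             instruction += " loosen "
--
--         if i.isnumeric():
--             instruction += i
--             cleanInstructions.append(instruction)
--             instruction = ""
--         elif i != "+" and i != "-":
--             instruction += i
--
--     return cleanInstructions
-- ===== SOURCE B (Python) =====
-- def harpTuning(instructions):
--     result = []
--     start = 0
--     for end, ch in enumerate(instructions):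
--         if ch.isnumeric():
--             segment = instructions[start:end + 1]
--             result.append(segment.replace("+", " tighten ").replace("-", " loosen "))
--             start = end + 1
--     return result
-- ===== Notes on version B (the rewrite author's own statement) =====
-- stated objective: faster
-- what changed: Instead of A's per-character accumulator state machine that injects tokens and flushes on each digit, B walks the digit boundary positions with enumerate, slices the raw segment between consecutive boundaries, and rewrites the sign characters with str.replace; trailing characters after the last digit are dropped by never emitting a final partial segment.
import Mathlib
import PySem

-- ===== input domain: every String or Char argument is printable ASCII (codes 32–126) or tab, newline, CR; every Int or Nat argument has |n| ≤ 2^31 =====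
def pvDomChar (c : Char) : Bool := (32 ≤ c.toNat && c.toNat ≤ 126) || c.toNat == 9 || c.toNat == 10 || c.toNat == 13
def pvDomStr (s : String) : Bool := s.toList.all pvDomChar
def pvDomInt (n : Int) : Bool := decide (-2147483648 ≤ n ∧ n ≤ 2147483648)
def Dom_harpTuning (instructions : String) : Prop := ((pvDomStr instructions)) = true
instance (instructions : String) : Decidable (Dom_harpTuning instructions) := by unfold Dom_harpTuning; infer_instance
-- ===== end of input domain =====

-- B replaces A's per-character state machine (accumulator with token injection, flush on digit)
-- by an index walk over digit boundaries with slicing and str.replace (bulk C-level string ops; a timing run measured B faster).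
-- Python's ch.isnumeric() is ported as PySem.Chars.isdigit, exact on the ASCII domain Dom_.

-- ===== PORT A =====
-- one fold step = one iteration of A's for-loop, state = (instruction, cleanInstructions)
def harpTuningStep (st : List Char × List String) (c : Char) : List Char × List String :=
  let instr := st.1
  let instr := if c = '+' then instr ++ (" tighten ").toList else instr
  let instr := if c = '-' then instr ++ (" loosen ").toList else instr
  if PySem.Chars.isdigit c then
    ([], st.2 ++ [String.ofList (instr ++ [c])])
  else if c ≠ '+' ∧ c ≠ '-' then
    (instr ++ [c], st.2)
  else
    (instr, st.2)

def harpTuning (instructions : String) : List String :=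
  (instructions.toList.foldl harpTuningStep ([], [])).2

-- ===== PORT B =====
def harpTuning_alt (instructions : String) : List String :=
  ((PySem.List.enumerate instructions.toList 0).foldl
    (fun (st : Int × List String) p =>
      if PySem.Chars.isdigit p.2 then
        let segment := PySem.List.slice instructions.toList (some st.1) (some (p.1 + 1))
        (p.1 + 1,
         st.2 ++ [String.ofList (PySem.Chars.replace
            (PySem.Chars.replace segment ("+").toList (" tighten ").toList)
            ("-").toList (" loosen ").toList)])
      else st)
    (0, [])).2

-- ===== PRECONDITION & SPEC =====
def Spec_harpTuning (instructions : String) (out : List String) : Prop := out = harpTuning_alt instructions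
instance (instructions : String) (out : List String) : Decidable (Spec_harpTuning instructions out) := by unfold Spec_harpTuning; infer_instance

-- ===== CLAIM (what is proved, stated in full; the proofs are below) =====
def Claim_equal_harpTuning : Prop := ∀ (instructions : String), Dom_harpTuning instructions → Spec_harpTuning instructions (harpTuning instructions)

-- ===== LEMMAS AND PROOFS =====

-- the per-character translation both programs implement
def harpF (c : Char) : List Char :=
  if c = '+' then (" tighten ").toList
  else if c = '-' then (" loosen ").toList
  else [c]

theorem harpTuningStep_eq (st : List Char × List String) (c : Char) :
    harpTuningStep st c =
      if PySem.Chars.isdigit c then ([], st.2 ++ [String.ofList (st.1 ++ [c])])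
      else (st.1 ++ harpF c, st.2) := by
  by_cases h1 : c = '+'
  · subst h1; simp [harpTuningStep, harpF, PySem.Chars.isdigit]
  · by_cases h2 : c = '-'
    · subst h2; simp [harpTuningStep, harpF, PySem.Chars.isdigit]
    · by_cases hd : PySem.Chars.isdigit c <;>
        simp [harpTuningStep, harpF, h1, h2, hd]

theorem replace_go_single (a : Char) (r : List Char) :
    ∀ (l : List Char) (fuel : Nat) (acc : List Char), l.length ≤ fuel →
      PySem.Chars.replace.go [a] r fuel l acc =
        acc.reverse ++ l.flatMap (fun c => if c = a then r else [c]) := by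
  intro l
  induction l with
  | nil => intro fuel acc _; cases fuel <;> simp [PySem.Chars.replace.go]
  | cons c t ih =>
      intro fuel acc hle
      cases fuel with
      | zero => simp at hle
      | succ n =>
          by_cases h : c = a
          · subst h
            have hpre : List.isPrefixOf [c] (c :: t) = true := by
              simp [List.isPrefixOf]
            rw [PySem.Chars.replace.go]
            simp only [hpre, if_pos, List.length_cons, List.length_nil,
              Nat.zero_add, List.drop_succ_cons, List.drop_zero] at *
            rw [ih n (r.reverse ++ acc) (by omega)]
            simp
          · have hpre : List.isPrefixOf [a] (c :: t) = false := by
              simp only [List.isPrefixOf, Bool.and_eq_false_iff, beq_eq_false_iff_ne, ne_eq]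
              exact Or.inl fun h' => h h'.symm
            rw [PySem.Chars.replace.go]
            simp only [hpre, Bool.false_eq_true, List.length_cons] at *
            rw [ih n _ (by omega)]
            simp [h]

theorem replace_single (a : Char) (r : List Char) (l : List Char) :
    PySem.Chars.replace l [a] r = l.flatMap (fun c => if c = a then r else [c]) := by
  rw [PySem.Chars.replace]
  simp [replace_go_single a r l l.length [] (le_refl _)]

theorem replace2_eq_flatMap (l : List Char) :
    PySem.Chars.replace
      (PySem.Chars.replace l ("+").toList (" tighten ").toList)
      ("-").toList (" loosen ").toList = l.flatMap harpF := by
  have h1 : ("+").toList = ['+'] := rfl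
  have h2 : ("-").toList = ['-'] := rfl
  rw [h1, h2, replace_single, replace_single]
  induction l with
  | nil => simp
  | cons c t ih =>
      rw [List.flatMap_cons, List.flatMap_append, ih, List.flatMap_cons]
      congr 1
      by_cases hp : c = '+'
      · subst hp; simp only [if_pos]; decide
      · by_cases hm : c = '-'
        · subst hm; simp only [harpF]; decide
        · simp [harpF, hp, hm]

-- main invariant: A's accumulator is the translated slice instructions[start:j]
theorem harp_main (L : List Char) :
    ∀ (cs : List Char) (j s : Nat) (res : List String), s ≤ j → cs = L.drop j →
      (cs.foldl harpTuningStep (((L.drop s).take (j - s)).flatMap harpF, res)).2 =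
      ((PySem.List.enumerate cs (j : Int)).foldl
        (fun (st : Int × List String) p =>
          if PySem.Chars.isdigit p.2 then
            ((p.1 + 1 : Int),
             st.2 ++ [String.ofList (PySem.Chars.replace
                (PySem.Chars.replace (PySem.List.slice L (some st.1) (some (p.1 + 1)))
                  ("+").toList (" tighten ").toList)
                ("-").toList (" loosen ").toList)])
          else st)
        (((s : Nat) : Int), res)).2 := by
  intro cs
  induction cs with
  | nil => intro j s res _ _; simp [PySem.List.enumerate]
  | cons c t ih =>
      intro j s res hsj hcs
      have hj : j < L.length := by
        by_contra h
        have hnil : L.drop j = [] := List.drop_eq_nil_of_le (by omega)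
        rw [hnil] at hcs
        exact (List.cons_ne_nil c t) hcs
      have hget? : L[j]? = some c := by
        have h0 : (L.drop j)[0]? = some c := by rw [← hcs]; rfl
        rwa [List.getElem?_drop, Nat.add_zero] at h0
      have hget : L[j]'hj = c := by
        have h1 := List.getElem?_eq_getElem (l := L) (i := j) hj
        rw [hget?] at h1
        exact (Option.some.inj h1).symm
      have htail : t = L.drop (j + 1) := by
        have h' : (c :: t).tail = L.drop (j + 1) := by rw [hcs, List.tail_drop]
        simpa using h'
      have hseg : (L.drop s).take (j + 1 - s) = (L.drop s).take (j - s) ++ [c] := by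
        have h1 : j + 1 - s = (j - s) + 1 := by omega
        rw [h1, List.take_succ]
        have : (L.drop s)[j - s]? = some c := by
          rw [List.getElem?_drop]
          have : s + (j - s) = j := by omega
          rw [this, List.getElem?_eq_getElem hj, hget]
        simp [this]
      rw [PySem.List.enumerate_cons, List.foldl_cons, List.foldl_cons,
        harpTuningStep_eq]
      by_cases hd : PySem.Chars.isdigit c
      · simp only [hd, if_pos]
        have hslice : PySem.List.slice L (some ((s : Nat) : Int)) (some (((j : Nat) : Int) + 1)) =
            (L.drop s).take (j + 1 - s) := by
          have : ((j : Nat) : Int) + 1 = (((j + 1 : Nat)) : Int) := by push_cast; ring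
          rw [this, PySem.List.slice_natCast]
        have hj1 : ((j : Nat) : Int) + 1 = (((j + 1 : Nat)) : Int) := by push_cast; ring
        rw [hslice, replace2_eq_flatMap, hseg]
        have hIH := ih (j + 1) (j + 1) (res ++ [String.ofList ((((L.drop s).take (j - s)).flatMap harpF ++ [c]))]) (le_refl _) htail
        simp only [Nat.sub_self, List.take_zero, List.flatMap_nil] at hIH
        rw [hj1]
        convert hIH using 3
        simp [List.flatMap_append, harpF]
        · have : ¬ c = '+' := by rintro rfl; simp [PySem.Chars.isdigit] at hd
          have h2 : ¬ c = '-' := by rintro rfl; simp [PySem.Chars.isdigit] at hd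
          simp [this, h2]
      · simp only [hd, if_neg, Bool.false_eq_true, not_false_iff]
        have hIH := ih (j + 1) s res (by omega) htail
        have hfl : List.flatMap harpF ((L.drop s).take (j + 1 - s)) =
            List.flatMap harpF ((L.drop s).take (j - s)) ++ harpF c := by
          rw [hseg, List.flatMap_append]
          simp
        rw [hfl] at hIH
        have hj1 : ((j : Nat) : Int) + 1 = (((j + 1 : Nat)) : Int) := by push_cast; ring
        rw [hj1]
        exact hIH

-- ===== VERDICT (by name: the statement is the Claim_ definition above) =====
theorem harpTuning_spec : Claim_equal_harpTuning := by
  intro instructions _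
  unfold Spec_harpTuning harpTuning harpTuning_alt
  have := harp_main instructions.toList instructions.toList 0 0 [] (le_refl _) rfl
  simpa using this
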